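-- pv_equiv track=rewrite | github.com/subeend/Study-coding | 프로그래머스/0/181932. 코드 처리하기/코드 처리하기.py | solution
-- ===== SOURCE A (Python) =====
-- def solution(code):
--     answer=''
--
--     mode = False
--     for idx,i in enumerate(code):
--         if i =="1":
--             mode = not mode
--             continue
--         if not mode and idx%2==0:
--             answer += i
--         elif mode and idx%2==1:
--             answer += i
--     if not answer:
--         return "EMPTY"
--
--     return answer
-- ===== SOURCE B (Python) =====
-- def solution(code):
--     kept = ''.join(c for c in code if c != '1')
--     answer = kept[::2]
--     return answer if answer else "EMPTY"
-- ===== Notes on version B (the rewrite author's own statement) =====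
-- stated objective: simpler
-- what changed: Replaces the index/mode-toggle walk with its algebraic collapse: drop every toggle character, then take every second character of what remains (the toggle and index parity cancel), keeping the EMPTY sentinel.
import Mathlib
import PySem

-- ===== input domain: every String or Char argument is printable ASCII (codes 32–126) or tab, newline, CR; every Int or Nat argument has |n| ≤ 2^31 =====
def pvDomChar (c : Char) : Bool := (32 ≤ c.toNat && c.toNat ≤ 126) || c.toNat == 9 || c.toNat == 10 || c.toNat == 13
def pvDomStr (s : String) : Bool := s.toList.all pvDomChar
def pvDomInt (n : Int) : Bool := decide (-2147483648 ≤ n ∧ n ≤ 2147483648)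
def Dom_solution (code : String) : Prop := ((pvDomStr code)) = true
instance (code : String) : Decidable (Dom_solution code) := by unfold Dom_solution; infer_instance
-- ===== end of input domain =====

-- B replaces A's index/mode-toggle walk by dropping every '1' and taking every second
-- remaining character (the toggle and the index parity cancel); objective: simpler.

-- ===== PORT A =====
-- one step of A's for-loop over enumerate(code): state = (answer, mode)
def solAStep (st : List Char × Bool) (p : Int × Char) : List Char × Bool :=
  if p.2 = '1' then (st.1, !st.2)
  else if !st.2 && (PySem.Int.mod p.1 2 == 0) then (st.1 ++ [p.2], st.2)
  else if st.2 && (PySem.Int.mod p.1 2 == 1) then (st.1 ++ [p.2], st.2)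
  else st

def solution (code : String) : String :=
  let st := (PySem.List.enumerate code.toList 0).foldl solAStep ([], false)
  if st.1.isEmpty then "EMPTY" else String.ofList st.1

-- ===== PORT B =====
def solution_alt (code : String) : String :=
  let kept := code.toList.filter (fun c => c != '1')   -- ''.join(c for c in code if c != '1')
  let answer := (PySem.List.slice? kept none none 2).getD []   -- kept[::2]; step 2 ≠ 0, never none
  if answer.isEmpty then "EMPTY" else String.ofList answer

-- ===== PRECONDITION & SPEC =====
def Spec_solution (code : String) (out : String) : Prop := out = solution_alt code
instance (code : String) (out : String) : Decidable (Spec_solution code out) := by unfold Spec_solution; infer_instance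

-- ===== CLAIM (what is proved, stated in full; the proofs are below) =====
def Claim_equal_solution : Prop := ∀ (code : String), Dom_solution code → Spec_solution code (solution code)

-- ===== LEMMAS AND PROOFS =====

-- every-second-element, starting with the first when the flag is true
def pick : List Char → Bool → List Char
  | [], _ => []
  | x :: xs, true => x :: pick xs false
  | _ :: xs, false => pick xs true

theorem pick_key : ∀ (l : List Char),
    (List.range ((l.length + 1) / 2)).filterMap (fun k => l[2 * k]?) = pick l true
  | [] => by simp [pick]
  | [x] => by simp [pick, List.range_succ]
  | x :: y :: l => by
      have ih := pick_key l
      have hlen : (((x :: y :: l).length + 1) / 2) = (l.length + 1) / 2 + 1 := by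
        simp; omega
      rw [hlen, List.range_succ_eq_map, List.filterMap_cons]
      simp only [List.filterMap_map]
      have : ∀ k : Nat, ((fun k => (x :: y :: l)[2 * k]?) ∘ Nat.succ) k = l[2 * k]? := by
        intro k
        simp [Function.comp]
        have h2 : 2 * (k + 1) = 2 * k + 1 + 1 := by omega
        rw [h2]
        simp
      rw [List.filterMap_congr (fun k _ => this k), ih]
      simp [pick]

theorem sliceTwo (xs : List Char) :
    PySem.List.slice? xs none none 2 = some (pick xs true) := by
  simp only [PySem.List.slice?, PySem.List.sliceIndices]
  norm_num
  have hc : (if 0 < xs.length then (((xs.length : Int) + 2 - 1) / 2).toNat else 0)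
      = (xs.length + 1) / 2 := by
    split <;> omega
  rw [hc]
  refine (List.filterMap_congr ?_).trans (pick_key xs)
  intro k _
  congr 1
  all_goals omega

-- A's loop invariant: starting at index idx with toggle mode, the loop appends to acc
-- exactly every second non-'1' character, starting with the first iff mode == (idx odd).
theorem loopA : ∀ (cs : List Char) (idx : Nat) (mode : Bool) (acc : List Char),
    ((PySem.List.enumerate cs (idx : Int)).foldl solAStep (acc, mode)).1
      = acc ++ pick (cs.filter (fun c => c != '1')) (mode == decide (idx % 2 = 1))
  | [], idx, mode, acc => by simp [PySem.List.enumerate_nil, pick]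
  | c :: cs, idx, mode, acc => by
      rw [PySem.List.enumerate_cons, List.foldl_cons]
      have hcast : ((idx : Int) + 1) = ((idx + 1 : Nat) : Int) := by push_cast; ring
      by_cases h1 : c = '1'
      · have hstep : solAStep (acc, mode) ((idx : Int), c) = (acc, !mode) := by
          simp [solAStep, h1]
        rw [hstep, hcast, loopA cs (idx + 1) (!mode) acc]
        have hflag : ((!mode) == decide ((idx + 1) % 2 = 1)) = (mode == decide (idx % 2 = 1)) := by
          rcases Nat.even_or_odd idx with he | ho
          · have : idx % 2 = 0 := Nat.even_iff.mp he
            have : (idx + 1) % 2 = 1 := by omega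
            cases mode <;> simp_all
          · have : idx % 2 = 1 := Nat.odd_iff.mp ho
            have : (idx + 1) % 2 = 0 := by omega
            cases mode <;> simp_all
        rw [hflag]; simp [h1]
      · have hflip : ∀ m : Bool, (m == decide ((idx + 1) % 2 = 1))
            = !(m == decide (idx % 2 = 1)) := by
          intro m
          rcases Nat.even_or_odd idx with he | ho
          · have : idx % 2 = 0 := Nat.even_iff.mp he
            have : (idx + 1) % 2 = 1 := by omega
            cases m <;> simp_all
          · have : idx % 2 = 1 := Nat.odd_iff.mp ho
            have : (idx + 1) % 2 = 0 := by omega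
            cases m <;> simp_all
        by_cases hflag : (mode == decide (idx % 2 = 1)) = true
        · -- the character is kept
          have hstep : solAStep (acc, mode) ((idx : Int), c) = (acc ++ [c], mode) := by
            cases mode with
            | false =>
                have : idx % 2 = 0 := by
                  rcases Nat.mod_two_eq_zero_or_one idx with h | h
                  · exact h
                  · simp [h] at hflag
                simp [solAStep, h1]
                all_goals omega
            | true =>
                have : idx % 2 = 1 := by
                  rcases Nat.mod_two_eq_zero_or_one idx with h | h
                  · simp [h] at hflag
                  · exact h
                simp [solAStep, h1]
                all_goals omega
          rw [hstep, hcast, loopA cs (idx + 1) mode (acc ++ [c]), hflip, hflag]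
          simp [h1, pick]
        · -- the character is skipped
          have hflag' : (mode == decide (idx % 2 = 1)) = false := by
            revert hflag; cases (mode == decide (idx % 2 = 1)) <;> simp
          have hstep : solAStep (acc, mode) ((idx : Int), c) = (acc, mode) := by
            cases mode with
            | false =>
                have : idx % 2 = 1 := by
                  rcases Nat.mod_two_eq_zero_or_one idx with h | h
                  · simp [h] at hflag'
                  · exact h
                simp [solAStep, h1]
                all_goals omega
            | true =>
                have : idx % 2 = 0 := by
                  rcases Nat.mod_two_eq_zero_or_one idx with h | h
                  · exact h
                  · simp [h] at hflag'
                simp [solAStep, h1]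
                all_goals omega
          rw [hstep, hcast, loopA cs (idx + 1) mode acc, hflip, hflag']
          simp [h1, pick]

theorem result_eq (code : String) :
    ((PySem.List.enumerate code.toList 0).foldl solAStep ([], false)).1
      = (PySem.List.slice? (code.toList.filter (fun c => c != '1')) none none 2).getD [] := by
  have h0 : (0 : Int) = ((0 : Nat) : Int) := rfl
  rw [h0, loopA code.toList 0 false [], sliceTwo]
  simp

-- ===== VERDICT (by name: the statement is the Claim_ definition above) =====
theorem solution_spec : Claim_equal_solution := by
  intro code _
  unfold Spec_solution
  simp only [solution, solution_alt]
  rw [result_eq]
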